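-- pv_equiv track=rewrite | github.com/Zaker237/advent-of-code-2025 | day3/Lobby/main.py | find_max_digit
-- ===== SOURCE A (Python) =====
-- def find_max_digit(value: str, MAX=1) -> tuple[int, int]:
--     if MAX == 0:
--         digits = [int(value[val]) for val in range(len(value))]
--     else:
--         digits = [int(value[:MAX][val]) for val in range(len(value[:MAX]))]
--     first_digit = max(digits)
--     first_digit_pos = digits.index(first_digit)
--     return first_digit, first_digit_pos
-- ===== SOURCE B (Python) =====
-- def find_max_digit(value: str, MAX=1) -> tuple[int, int]:
--     # single pass with a running best instead of list-building + max + .index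
--     prefix = value if MAX == 0 else value[:MAX]
--     if not prefix:
--         raise ValueError("max() arg is an empty sequence")
--     best_d, best_p = -1, -1
--     for i, c in enumerate(prefix):
--         d = int(c)
--         if best_d < d:
--             best_d, best_p = d, i
--     return best_d, best_p
-- ===== Notes on version B (the rewrite author's own statement) =====
-- stated objective: alternative
-- what changed: Replaces building a digit list then two extra scans (max and .index) by one enumerate loop that keeps a running (best_digit, best_pos) pair, updating only on strict increase so the first maximum wins.
import Mathlib
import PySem

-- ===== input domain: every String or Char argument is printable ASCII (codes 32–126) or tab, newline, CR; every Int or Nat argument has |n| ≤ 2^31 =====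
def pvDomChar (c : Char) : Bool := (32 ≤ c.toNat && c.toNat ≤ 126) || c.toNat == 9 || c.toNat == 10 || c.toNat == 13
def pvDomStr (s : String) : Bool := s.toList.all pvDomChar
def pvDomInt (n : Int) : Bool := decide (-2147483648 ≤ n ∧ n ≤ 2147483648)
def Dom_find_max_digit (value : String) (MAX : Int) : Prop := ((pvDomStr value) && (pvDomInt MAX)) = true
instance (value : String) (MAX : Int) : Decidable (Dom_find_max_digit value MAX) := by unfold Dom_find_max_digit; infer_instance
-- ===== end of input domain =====

-- B replaces A's digit-list + max + .index (three passes) by one enumerate loop keeping a running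
-- (best_digit, best_pos) pair; equal wherever A returns (Pre_: nonempty all-digit selected prefix).


-- ===== PORT A =====
-- int(ch) for a one-character string; `.getD 0` is unreachable under Pre_ (Python raises ValueError there)
def pyIntChar (c : Char) : Int := (PySem.Int.ofChars? [c]).getD 0

def find_max_digit (value : String) (MAX : Int) : Int × Int :=
  let digits : List Int :=
    if MAX = 0 then
      (PySem.List.pyRange 0 (PySem.Str.len value) 1).map
        (fun i => pyIntChar (PySem.List.pyGetD value.toList i ' '))
    else
      let pref := PySem.List.slice value.toList none (some MAX)
      (PySem.List.pyRange 0 (PySem.List.len pref) 1).map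
        (fun i => pyIntChar (PySem.List.pyGetD pref i ' '))
  let first_digit : Int := (PySem.List.max? digits (fun y => y)).getD 0
  let first_digit_pos : Int := ((PySem.List.index? digits first_digit).getD 0 : Nat)
  (first_digit, first_digit_pos)

-- ===== PORT B =====
def find_max_digit_alt (value : String) (MAX : Int) : Int × Int :=
  let pref := if MAX = 0 then value.toList else PySem.List.slice value.toList none (some MAX)
  if pref = [] then (-1, -1) else  -- Python B raises ValueError here; Pre_ excludes it
  (PySem.List.enumerate pref 0).foldl
    (fun best p => let d := pyIntChar p.2; if best.1 < d then (d, p.1) else best)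
    (-1, -1)

-- ===== PRECONDITION & SPEC =====
-- Pre_ excludes exactly the inputs where Python A raises ValueError: an empty selected prefix
-- (max([]) raises) or a non-digit character in the prefix (int(ch) raises).
def Pre_find_max_digit (value : String) (MAX : Int) : Prop :=
  (if MAX = 0 then value.toList else PySem.List.slice value.toList none (some MAX)) ≠ [] ∧
  (if MAX = 0 then value.toList else PySem.List.slice value.toList none (some MAX)).all Char.isDigit = true
instance (value : String) (MAX : Int) : Decidable (Pre_find_max_digit value MAX) := by
  unfold Pre_find_max_digit; infer_instance
def pvWitness_find_max_digit : String × Int := ("97321", 3)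

def Spec_find_max_digit (value : String) (MAX : Int) (out : Int × Int) : Prop := out = find_max_digit_alt value MAX
instance (value : String) (MAX : Int) (out : Int × Int) : Decidable (Spec_find_max_digit value MAX out) := by unfold Spec_find_max_digit; infer_instance

-- ===== CLAIM (what is proved, stated in full; the proofs are below) =====
def Claim_equal_find_max_digit : Prop := ∀ (value : String) (MAX : Int), Dom_find_max_digit value MAX → Pre_find_max_digit value MAX → Spec_find_max_digit value MAX (find_max_digit value MAX)

-- ===== LEMMAS AND PROOFS =====

theorem pv_bind_natCast_nonneg (o : Option Nat) : 0 ≤ (o.bind fun a : Nat => some ((a : Int))).getD 0 := by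
  cases o <;> simp

-- int(ch) of a digit character is a nonnegative integer
theorem pyIntChar_nonneg (c : Char) (h : c.isDigit) : 0 ≤ pyIntChar c := by
  have hs : PySem.Int.isIntSpace c = false := by
    simp only [PySem.Int.isIntSpace, Bool.or_eq_false_iff, decide_eq_false_iff_not]
    refine ⟨⟨⟨⟨⟨?_, ?_⟩, ?_⟩, ?_⟩, ?_⟩, ?_⟩ <;> rintro rfl <;> simp [Char.isDigit] at h
  have h1 : (List.dropWhile PySem.Int.isIntSpace (List.dropWhile PySem.Int.isIntSpace [c]).reverse).reverse = [c] := by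
    simp [List.dropWhile, hs]
  unfold pyIntChar
  simp only [PySem.Int.ofChars?, Option.pure_def, Option.bind_eq_bind, Option.map_bind,
    Function.comp_apply, Option.map_some, Option.map_id_fun', id_eq, h1]
  split
  · rename_i ds hds
    simp only [List.cons.injEq] at hds
    exfalso; rw [hds.1] at h; simp [Char.isDigit] at h
  · rename_i ds hds
    simp only [List.cons.injEq] at hds
    exfalso; rw [hds.1] at h; simp [Char.isDigit] at h
  · apply pv_bind_natCast_nonneg

theorem foldl_max_eq_or_mem (t : List Int) (b : Int) : t.foldl max b = b ∨ t.foldl max b ∈ t := by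
  induction t generalizing b with
  | nil => left; rfl
  | cons x t ih =>
    simp only [List.foldl_cons]
    rcases ih (max b x) with h | h
    · rw [h]
      rcases max_choice b x with h2 | h2 <;> rw [h2]
      · left; rfl
      · right; exact List.mem_cons_self
    · right; exact List.mem_cons_of_mem _ h

-- A's index-loop comprehension builds exactly the mapped list
theorem digits_eq_map (xs : List Char) :
    (PySem.List.pyRange 0 (PySem.List.len xs) 1).map (fun i => pyIntChar (PySem.List.pyGetD xs i ' '))
      = xs.map pyIntChar := by
  have h : (fun i => pyIntChar (PySem.List.pyGetD xs i ' '))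
      = pyIntChar ∘ (fun j => PySem.List.pyGetD xs j ' ') := rfl
  rw [h, ← List.map_map, PySem.List.map_pyGetD_pyRange_zero]

-- the running-best loop computes (running max, position of its first strict improvement)
theorem loop_core (t : List Char) : ∀ (s b q : Int),
    (PySem.List.enumerate t s).foldl
        (fun best p => let d := pyIntChar p.2; if best.1 < d then (d, p.1) else best) (b, q)
      = ((t.map pyIntChar).foldl max b,
         if b < (t.map pyIntChar).foldl max b then
           s + (((PySem.List.index? (t.map pyIntChar) ((t.map pyIntChar).foldl max b)).getD 0 : Nat) : Int)
         else q) := by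
  induction t with
  | nil => intro s b q; simp [PySem.List.enumerate]
  | cons x t ih =>
    intro s b q
    rw [PySem.List.enumerate_cons, List.foldl_cons]
    simp only [List.map_cons, List.foldl_cons]
    by_cases hbd : b < pyIntChar x
    · rw [if_pos hbd, ih (s + 1) (pyIntChar x) s]
      have hle := (PySem.List.le_foldl_max (t.map pyIntChar) (pyIntChar x)).1
      have hmax : max b (pyIntChar x) = pyIntChar x := max_eq_right (le_of_lt hbd)
      rw [hmax, if_pos (lt_of_lt_of_le hbd hle)]
      by_cases hxf : pyIntChar x < (t.map pyIntChar).foldl max (pyIntChar x)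
      · rw [if_pos hxf]
        have hmem : (t.map pyIntChar).foldl max (pyIntChar x) ∈ t.map pyIntChar := by
          rcases foldl_max_eq_or_mem (t.map pyIntChar) (pyIntChar x) with h | h
          · exfalso; rw [h] at hxf; exact lt_irrefl _ hxf
          · exact h
        rw [PySem.List.index?_cons_of_ne _ (ne_of_lt hxf)]
        rcases Option.isSome_iff_exists.mp ((PySem.List.index?_isSome_iff (t.map pyIntChar) _).2 hmem) with ⟨j, hj⟩
        rw [hj]
        simp only [Option.map_some, Option.getD_some]
        push_cast
        ring_nf
      · rw [if_neg hxf]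
        have : pyIntChar x = (t.map pyIntChar).foldl max (pyIntChar x) := le_antisymm hle (not_lt.mp hxf)
        rw [← this, PySem.List.index?_cons_self]
        simp
    · rw [if_neg hbd, ih (s + 1) b q]
      have hmax : max b (pyIntChar x) = b := max_eq_left (not_lt.mp hbd)
      rw [hmax]
      by_cases hbf : b < (t.map pyIntChar).foldl max b
      · rw [if_pos hbf, if_pos hbf]
        have hmem : (t.map pyIntChar).foldl max b ∈ t.map pyIntChar := by
          rcases foldl_max_eq_or_mem (t.map pyIntChar) b with h | h
          · exfalso; rw [h] at hbf; exact lt_irrefl _ hbf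
          · exact h
        have hne : pyIntChar x ≠ (t.map pyIntChar).foldl max b :=
          ne_of_lt (lt_of_le_of_lt (not_lt.mp hbd) hbf)
        rw [PySem.List.index?_cons_of_ne _ hne]
        rcases Option.isSome_iff_exists.mp ((PySem.List.index?_isSome_iff (t.map pyIntChar) _).2 hmem) with ⟨j, hj⟩
        rw [hj]
        simp only [Option.map_some, Option.getD_some]
        push_cast
        ring_nf
      · rw [if_neg hbf, if_neg hbf]

-- ===== VERDICT (by name: the statement is the Claim_ definition above) =====
theorem find_max_digit_spec : Claim_equal_find_max_digit := by
  intro value MAX _ hpre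
  unfold Spec_find_max_digit find_max_digit find_max_digit_alt
  obtain ⟨hne, hdig⟩ := hpre
  -- name the selected prefix
  set P : List Char := if MAX = 0 then value.toList else PySem.List.slice value.toList none (some MAX) with hP
  -- A's digits list is P.map pyIntChar in both branches
  have hdigits :
      (if MAX = 0 then
        (PySem.List.pyRange 0 (PySem.Str.len value) 1).map
          (fun i => pyIntChar (PySem.List.pyGetD value.toList i ' '))
      else
        (PySem.List.pyRange 0 (PySem.List.len (PySem.List.slice value.toList none (some MAX))) 1).map
          (fun i => pyIntChar (PySem.List.pyGetD (PySem.List.slice value.toList none (some MAX)) i ' ')))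
      = P.map pyIntChar := by
    by_cases h0 : MAX = 0
    · rw [if_pos h0, hP, if_pos h0]
      have : PySem.Str.len value = PySem.List.len value.toList := by
        simp [PySem.Str.len_eq, PySem.List.len]
      rw [this, digits_eq_map]
    · rw [if_neg h0, hP, if_neg h0, digits_eq_map]
  simp only [hdigits]
  rw [if_neg hne, loop_core P 0 (-1) (-1)]
  -- P is nonempty with all digits
  rcases hPc : P with _ | ⟨c, rest⟩
  · exact absurd hPc hne
  · have hc : c.isDigit := List.all_eq_true.mp hdig c (by rw [hPc]; exact List.mem_cons_self)
    have hc0 : 0 ≤ pyIntChar c := pyIntChar_nonneg c hc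
    simp only [List.map_cons, List.foldl_cons]
    have hmax1 : max (-1 : Int) (pyIntChar c) = pyIntChar c := max_eq_right (by omega)
    rw [hmax1]
    have hF := (PySem.List.le_foldl_max (rest.map pyIntChar) (pyIntChar c)).1
    rw [PySem.List.max?_id_cons]
    simp only [Option.getD_some]
    rw [if_pos (by omega : (-1 : Int) < (rest.map pyIntChar).foldl max (pyIntChar c))]
    simp
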